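-- pv_equiv track=rewrite | github.com/LobsterTrap/lola | src/lola/cli/install.py | _expand_csv
-- ===== SOURCE A (Python) =====
-- def _expand_csv(values: tuple[str, ...]) -> list[str]:
--     """Expand a click multiple=True tuple, splitting any comma-separated values.
--
--     ``--skill foo,bar --skill baz`` and ``--skill foo --skill bar --skill baz``
--     are both flattened to ``["foo", "bar", "baz"]``. Whitespace and empty
--     entries are dropped.
--     """
--     out: list[str] = []
--     for v in values:
--         for part in v.split(","):
--             part = part.strip()
--             if part:
--                 out.append(part)
--     return out
-- ===== SOURCE B (Python) =====
-- def _expand_csv(values: tuple[str, ...]) -> list[str]: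
--     """Single character-level scan: tokens are built in place with a
--     pending-whitespace buffer, so no split()/strip() intermediates exist."""
--     out: list[str] = []
--     for v in values:
--         cur: list[str] = []   # chars of the current token, already left-stripped
--         pend: list[str] = []  # whitespace seen since the last non-space char
--         for c in v:
--             if c == ',':
--                 if cur:
--                     out.append(''.join(cur))
--                 cur = []
--                 pend = []
--             elif c.isspace():
--                 if cur:
--                     pend.append(c)
--             else:
--                 cur.extend(pend)
--                 cur.append(c)
--                 pend = []
--         if cur:
--             out.append(''.join(cur))
--     return out
-- ===== Notes on version B (the rewrite author's own statement) =====
-- stated objective: alternative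
-- what changed: Replaces A's split/strip pipeline (split each value on ',', strip each part, filter) with a single character-level state machine that builds each token in place using a current-token buffer and a pending-whitespace buffer, emitting at commas and end of value; no split or strip calls and no intermediate part strings.
import Mathlib
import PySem

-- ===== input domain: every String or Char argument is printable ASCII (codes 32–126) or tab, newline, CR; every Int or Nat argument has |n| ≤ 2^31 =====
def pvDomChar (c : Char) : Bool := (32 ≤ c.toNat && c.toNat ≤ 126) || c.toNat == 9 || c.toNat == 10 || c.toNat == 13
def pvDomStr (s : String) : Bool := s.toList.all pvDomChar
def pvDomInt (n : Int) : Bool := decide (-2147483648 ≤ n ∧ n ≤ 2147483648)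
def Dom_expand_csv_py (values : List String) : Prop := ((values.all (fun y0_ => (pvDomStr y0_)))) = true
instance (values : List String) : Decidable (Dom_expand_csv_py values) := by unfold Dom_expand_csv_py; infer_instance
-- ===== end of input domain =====

-- B replaces A's split/strip/filter pipeline with one character-level state-machine
-- scan (token buffer + pending-whitespace buffer); objective: alternative.

-- ===== PORT A =====
def expand_csv_py (values : List String) : List String :=
  values.foldl (fun out v =>
    ((PySem.Chars.splitOn v.toList [',']).map String.ofList).foldl
      (fun out part =>
        let p := PySem.Str.strip part
        if p ≠ "" then out ++ [p] else out) out) []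

-- ===== PORT B =====
-- transliteration of Source B's inner character loop: cur = current token's chars,
-- pend = whitespace seen since the last non-space char, out = the result so far
def scanVal : List Char → List Char → List Char → List String → List String
  | [], cur, _, out => if cur ≠ [] then out ++ [String.ofList cur] else out
  | c :: rest, cur, pend, out =>
    if c = ',' then
      scanVal rest [] [] (if cur ≠ [] then out ++ [String.ofList cur] else out)
    else if PySem.Chars.isspace c then
      scanVal rest cur (if cur ≠ [] then pend ++ [c] else pend) out
    else
      scanVal rest (cur ++ pend ++ [c]) [] out

def expand_csv_py_alt (values : List String) : List String :=
  values.foldl (fun out v => scanVal v.toList [] [] out) []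

-- ===== PRECONDITION & SPEC =====
def Spec_expand_csv_py (values : List String) (out : List String) : Prop := out = expand_csv_py_alt values
instance (values : List String) (out : List String) : Decidable (Spec_expand_csv_py values out) := by unfold Spec_expand_csv_py; infer_instance

-- ===== CLAIM (what is proved, stated in full; the proofs are below) =====
def Claim_equal_expand_csv_py : Prop := ∀ (values : List String), Dom_expand_csv_py values → Spec_expand_csv_py values (expand_csv_py values)

-- ===== LEMMAS AND PROOFS =====

/-- Simple structural model of splitting on a single comma. -/
def spl : List Char → List (List Char)
  | [] => [[]]
  | c :: rest => if c = ',' then [] :: spl rest else (spl rest).modifyHead (c :: ·)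

theorem spl_ne_nil (l : List Char) : spl l ≠ [] := by
  cases l with
  | nil => simp [spl]
  | cons c rest =>
    simp only [spl]
    split_ifs
    · simp
    · cases h : spl rest with
      | nil => exact absurd h (spl_ne_nil rest)
      | cons a t => simp [List.modifyHead]

theorem splitOn_go_eq (fuel : Nat) (l cur : List Char) (acc : List (List Char))
    (h : l.length ≤ fuel) :
    PySem.Chars.splitOn.go [','] fuel l cur acc
      = acc.reverse ++ (spl l).modifyHead (cur.reverse ++ ·) := by
  induction fuel generalizing l cur acc with
  | zero =>
    cases l with
    | nil => simp [PySem.Chars.splitOn.go, spl, List.modifyHead]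
    | cons c rest => simp at h
  | succ f ih =>
    cases l with
    | nil => simp [PySem.Chars.splitOn.go, spl, List.modifyHead]
    | cons c rest =>
      simp only [PySem.Chars.splitOn.go]
      by_cases hc : c = ','
      · subst hc
        have hpre : List.isPrefixOf [','] (',' :: rest) = true := by
          simp [List.isPrefixOf]
        rw [if_pos hpre]
        have hdrop : List.drop (List.length [',']) (',' :: rest) = rest := by simp
        rw [hdrop, ih rest [] (cur.reverse :: acc) (by simpa using Nat.le_of_succ_le_succ h)]
        simp only [spl, if_pos]
        cases hs : spl rest with
        | nil => exact absurd hs (spl_ne_nil rest)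
        | cons a t => simp [List.modifyHead]
      · have hpre : List.isPrefixOf [','] (c :: rest) = false := by
          simp [List.isPrefixOf]; exact fun hh => absurd hh.symm hc
        rw [if_neg (by simp [hpre])]
        have := ih rest (c :: cur) acc (by simpa using Nat.le_of_succ_le_succ h)
        rw [this]
        simp only [spl, if_neg hc]
        cases hs : spl rest with
        | nil => exact absurd hs (spl_ne_nil rest)
        | cons a t => simp [List.modifyHead]

theorem splitOn_eq_spl (l : List Char) :
    PySem.Chars.splitOn l [','] = spl l := by
  have h := splitOn_go_eq (l.length + 1) l [] [] (Nat.le_succ _)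
  rw [PySem.Chars.splitOn, h]
  cases hs : spl l with
  | nil => exact absurd hs (spl_ne_nil l)
  | cons a t => simp [List.modifyHead]

/-- per-part contribution, shared shape of both sides -/
def contribPart (p : List Char) : List String :=
  if PySem.Str.strip (String.ofList p) ≠ "" then [PySem.Str.strip (String.ofList p)] else []

theorem inner_foldl (parts : List String) (out : List String) :
    parts.foldl (fun out part =>
        let p := PySem.Str.strip part
        if p ≠ "" then out ++ [p] else out) out
      = out ++ (parts.filter (fun p => PySem.Str.strip p ≠ "")).map PySem.Str.strip := by
  induction parts generalizing out with
  | nil => simp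
  | cons x xs ih =>
    simp only [List.foldl_cons, List.filter_cons]
    by_cases hx : PySem.Str.strip x ≠ ""
    · rw [if_pos hx, ih]; simp [hx]
    · rw [if_neg hx, ih]; simp [hx]

theorem contrib_eq (parts : List (List Char)) :
    ((parts.map String.ofList).filter (fun p => PySem.Str.strip p ≠ "")).map PySem.Str.strip
      = parts.flatMap contribPart := by
  induction parts with
  | nil => simp
  | cons p ps ih =>
    simp only [List.map_cons, List.filter_cons, List.flatMap_cons, contribPart]
    simp only [decide_not] at ih
    by_cases hp : PySem.Str.strip (String.ofList p) ≠ ""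
    · simp [hp, ih]
    · simp [hp, ih]

theorem a_eq_flatMap (values : List String) :
    expand_csv_py values = values.flatMap (fun v => (spl v.toList).flatMap contribPart) := by
  unfold expand_csv_py
  induction values using List.reverseRecOn with
  | nil => simp
  | append_singleton xs v ih =>
    rw [List.foldl_append, List.foldl_cons, List.foldl_nil, ih, List.flatMap_append]
    rw [splitOn_eq_spl, inner_foldl, contrib_eq]
    simp

-- ===== B-side characterisation =====

/-- one character step of Source B's state machine on a comma-free stretch -/
def step (st : List Char × List Char) (c : Char) : List Char × List Char :=
  if PySem.Chars.isspace c then (st.1, if st.1 ≠ [] then st.2 ++ [c] else st.2)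
  else (st.1 ++ st.2 ++ [c], [])

def emitL (st : List Char × List Char) : List String :=
  if st.1 ≠ [] then [String.ofList st.1] else []

def toks (st : List Char × List Char) : List (List Char) → List String
  | [] => []
  | p :: ps => emitL (p.foldl step st) ++ ps.flatMap (fun q => emitL (q.foldl step ([], [])))

theorem toks_cons_char (st : List Char × List Char) (c : Char) (p : List Char)
    (ps : List (List Char)) :
    toks st ((c :: p) :: ps) = toks (step st c) (p :: ps) := by
  simp [toks]

theorem toks_flatMap (parts : List (List Char)) (h : parts ≠ []) :
    toks ([], []) parts = parts.flatMap (fun q => emitL (q.foldl step ([], []))) := by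
  cases parts with
  | nil => exact absurd rfl h
  | cons p ps => simp [toks]

theorem scanVal_eq (l : List Char) (cur pend : List Char) (out : List String) :
    scanVal l cur pend out = out ++ toks (cur, pend) (spl l) := by
  induction l generalizing cur pend out with
  | nil =>
    simp only [scanVal, spl, toks, List.foldl_nil, List.flatMap_nil, List.append_nil, emitL]
    split_ifs <;> simp
  | cons c rest ih =>
    by_cases hc : c = ','
    · subst hc
      simp only [scanVal, if_pos rfl, spl, if_pos rfl]
      rw [ih]
      rw [toks_flatMap _ (spl_ne_nil rest)]
      simp only [toks]
      cases hcur : decide (cur ≠ []) with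
      | true =>
        have : cur ≠ [] := of_decide_eq_true hcur
        simp [emitL, this, List.append_assoc]
      | false =>
        have : ¬ cur ≠ [] := of_decide_eq_false hcur
        simp [emitL, this]
    · have hsc : scanVal (c :: rest) cur pend out
          = scanVal rest (step (cur, pend) c).1 (step (cur, pend) c).2 out := by
        simp only [scanVal, if_neg hc, step]
        by_cases hws : PySem.Chars.isspace c = true
        · simp [hws]
        · simp [hws]
      rw [hsc, ih]
      simp only [spl, if_neg hc]
      cases hs : spl rest with
      | nil => exact absurd hs (spl_ne_nil rest)
      | cons p ps =>
        simp only [List.modifyHead]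
        rw [toks_cons_char]

theorem b_eq_flatMap (values : List String) :
    expand_csv_py_alt values
      = values.flatMap (fun v => toks ([], []) (spl v.toList)) := by
  unfold expand_csv_py_alt
  induction values using List.reverseRecOn with
  | nil => simp
  | append_singleton xs v ih =>
    rw [List.foldl_append, List.foldl_cons, List.foldl_nil, ih, List.flatMap_append]
    rw [scanVal_eq]
    simp

-- rstrip unfolded one character at the front
theorem rstrip_cons (c : Char) (rest : List Char) :
    PySem.Chars.rstrip (c :: rest)
      = if PySem.Chars.rstrip rest = [] then (if PySem.Chars.isspace c then [] else [c])
        else c :: PySem.Chars.rstrip rest := by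
  simp only [PySem.Chars.rstrip, List.reverse_cons, List.dropWhile_append]
  by_cases h : List.dropWhile PySem.Chars.isspace rest.reverse = []
  · simp only [h, List.isEmpty_nil]
    simp [List.dropWhile]
    by_cases hws : PySem.Chars.isspace c = true <;> simp [hws]
  · have hne : (List.dropWhile PySem.Chars.isspace rest.reverse).isEmpty ≠ true := by
      simpa [List.isEmpty_iff] using h
    have hne' : (List.dropWhile PySem.Chars.isspace rest.reverse).reverse ≠ [] := by
      simpa using h
    simp [hne, hne']

-- the fold's first component from a nonempty token buffer
theorem foldl_step_ne (p : List Char) (cur pend : List Char) (hcur : cur ≠ []) :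
    (p.foldl step (cur, pend)).1
      = if PySem.Chars.rstrip p = [] then cur else cur ++ pend ++ PySem.Chars.rstrip p := by
  induction p generalizing cur pend with
  | nil => simp [PySem.Chars.rstrip]
  | cons c rest ih =>
    rw [List.foldl_cons]
    by_cases hws : PySem.Chars.isspace c = true
    · have hstep : step (cur, pend) c = (cur, pend ++ [c]) := by
        simp [step, hws, hcur]
      rw [hstep, ih _ _ hcur, rstrip_cons, if_pos hws]
      by_cases hr : PySem.Chars.rstrip rest = []
      · simp [hr]
      · simp [hr, List.append_assoc]
    · have hstep : step (cur, pend) c = (cur ++ pend ++ [c], []) := by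
        simp [step, hws]
      rw [hstep, ih _ _ (by simp), rstrip_cons, if_neg hws]
      by_cases hr : PySem.Chars.rstrip rest = []
      · simp [hr]
      · simp [hr, List.append_assoc]

-- the state machine's finished token is exactly Python's strip
theorem foldl_step_strip (p : List Char) :
    (p.foldl step ([], [])).1 = PySem.Chars.strip p := by
  induction p with
  | nil => simp [PySem.Chars.strip, PySem.Chars.lstrip, PySem.Chars.rstrip]
  | cons c rest ih =>
    rw [List.foldl_cons]
    by_cases hws : PySem.Chars.isspace c = true
    · have hstep : step ([], []) c = ([], []) := by simp [step, hws]
      rw [hstep, ih]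
      simp [PySem.Chars.strip, PySem.Chars.lstrip, List.dropWhile, hws]
    · have hstep : step ([], []) c = ([c], []) := by simp [step, hws]
      rw [hstep, foldl_step_ne _ _ _ (by simp)]
      have hlstrip : PySem.Chars.lstrip (c :: rest) = c :: rest := by
        simp [PySem.Chars.lstrip, List.dropWhile, hws]
      simp only [PySem.Chars.strip, hlstrip, rstrip_cons, if_neg hws]
      by_cases hr : PySem.Chars.rstrip rest = []
      · simp [hr]
      · simp [hr]

theorem emitL_eq_contribPart (p : List Char) :
    emitL (p.foldl step ([], [])) = contribPart p := by
  have h1 := foldl_step_strip p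
  have hstr : PySem.Str.strip (String.ofList p) = String.ofList (PySem.Chars.strip p) := by
    simp [PySem.Str.strip]
  have hne : (String.ofList (PySem.Chars.strip p) ≠ "") ↔ (PySem.Chars.strip p ≠ []) := by
    constructor
    · intro h hc; exact h (by simp [hc])
    · intro h hc
      apply h
      have := congrArg String.toList hc
      simpa using this
  simp only [emitL, contribPart, h1, hstr]
  by_cases h : PySem.Chars.strip p ≠ []
  · rw [if_pos h, if_pos (hne.mpr h)]
  · rw [if_neg h, if_neg (fun hh => h (hne.mp hh))]

-- ===== VERDICT =====
theorem expand_csv_py_spec : Claim_equal_expand_csv_py := by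
  unfold Claim_equal_expand_csv_py
  intro values _
  unfold Spec_expand_csv_py
  rw [a_eq_flatMap, b_eq_flatMap]
  apply List.flatMap_congr
  intro v _
  rw [toks_flatMap _ (spl_ne_nil _)]
  apply List.flatMap_congr
  intro p _
  exact (emitL_eq_contribPart p).symm
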